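-- pv_equiv track=rewrite | github.com/joeljohansson99/adventofcode | 2024/src/day10.py | part1
-- ===== SOURCE A (Python) =====
-- def part1(input):
--     heads = set()
--     for r in range(len(input)):
--         for c in range(len(input[0])):
--             if input[r][c] == "0":
--                 heads.add((r,c))
--
--     score = 0
--     for head in heads:
--         score += bfs(input, head)
--
--     return score
--
-- def bfs(input, start):
--     visited = set()
--     current = set()
--     current.add(start)
--     visited.add(start)
--     score = 0
--     while current:
--         next = set()
--         for (r, c) in current:
--             for (dr,dc) in [(r+1,c),(r-1,c),(r,c+1),(r,c-1)]:
--                 if 0 <= dr < len(input) and 0 <= dc < len(input[0]) and (dr,dc) not in visited: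
--                     if int(input[dr][dc]) == (int(input[r][c]) + 1):
--                         if input[dr][dc] == "9":
--                             score += 1
--                         else:
--                             next.add((dr,dc))
--                         visited.add((dr,dc))
--         current = next
--     return score
-- ===== SOURCE B (Python) =====
-- def part1(input):
--     H = len(input)
--     W = len(input[0]) if input else 0
--     reach = {}
--     for ch in "9876543210":
--         for r in range(H):
--             for c in range(W):
--                 if input[r][c] == ch:
--                     if ch == "9":
--                         reach[(r, c)] = {(r, c)}
--                     else:
--                         up = chr(ord(ch) + 1)
--                         s = set()
--                         for (ar, ac) in ((r + 1, c), (r - 1, c), (r, c + 1), (r, c - 1)):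
--                             if 0 <= ar < H and 0 <= ac < W and input[ar][ac] == up:
--                                 s |= reach[(ar, ac)]
--                         reach[(r, c)] = s
--     total = 0
--     for r in range(H):
--         for c in range(W):
--             if input[r][c] == "0":
--                 total += len(reach[(r, c)])
--     return total
-- ===== Notes on version B (the rewrite author's own statement) =====
-- stated objective: alternative
-- what changed: A runs a per-trailhead BFS (worklist + visited set, counting 9s as they are discovered); B makes one bottom-up dynamic-programming sweep over heights 9..0 that stores, for every cell, the set of reachable '9' coordinates (a '9' cell maps to itself, a lower cell to the union of its higher neighbours' sets) and then sums the set sizes at the '0' cells; …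
-- outside the precondition, e.g. on part1(['05', '55', 'x5']): A returns 0, B returns 0
import Mathlib
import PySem

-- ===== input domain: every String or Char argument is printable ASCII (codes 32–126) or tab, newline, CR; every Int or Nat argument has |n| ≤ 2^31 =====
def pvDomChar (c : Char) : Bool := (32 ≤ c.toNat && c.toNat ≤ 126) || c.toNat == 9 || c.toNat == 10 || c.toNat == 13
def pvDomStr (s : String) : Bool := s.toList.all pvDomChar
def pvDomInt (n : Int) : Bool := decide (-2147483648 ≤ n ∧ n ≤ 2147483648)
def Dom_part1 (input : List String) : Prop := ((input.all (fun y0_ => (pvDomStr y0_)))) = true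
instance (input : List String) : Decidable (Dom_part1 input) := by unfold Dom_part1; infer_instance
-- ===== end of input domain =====

-- B replaces A's per-trailhead BFS by one global bottom-up pass: for heights 9 down to 0 it
-- builds, for every cell, the set of '9'-cells reachable from it (dynamic programming over
-- heights), then sums the set sizes at the '0' cells.  Objective: alternative decomposition.


-- ===== PORT A =====
-- input[r][c] as an optional char (none = Python IndexError, outside Pre_)
def cellA (input : List String) (r c : Int) : Option Char :=
  (PySem.List.pyGet? input r).bind (fun row => PySem.Str.pyGet? row c)

-- int(input[r][c]) (none = Python ValueError/IndexError, outside Pre_)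
def intCellA (input : List String) (r c : Int) : Option Int :=
  (cellA input r c).bind (fun ch => PySem.Int.ofChars? [ch])

-- body of A's innermost 'for (dr,dc) in [...]' loop: one candidate neighbour d of frontier cell rc
def candStepA (input : List String) (rc : Int × Int)
    (st : PySem.Set (Int × Int) × PySem.Set (Int × Int) × Int) (d : Int × Int) :
    PySem.Set (Int × Int) × PySem.Set (Int × Int) × Int :=
  let (nxt, vis, score) := st
  if 0 ≤ d.1 ∧ d.1 < (input.length : Int) ∧ 0 ≤ d.2 ∧ d.2 < ((input.headD "").toList.length : Int)
      ∧ ¬ (d ∈ vis) then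
    match intCellA input d.1 d.2, intCellA input rc.1 rc.2 with
    | some a, some b =>
      if a = b + 1 then
        if cellA input d.1 d.2 = some '9' then (nxt, PySem.Set.add vis d, score + 1)
        else (PySem.Set.add nxt d, PySem.Set.add vis d, score)
      else (nxt, vis, score)
    | _, _ => (nxt, vis, score)  -- int() raised ValueError in Python: outside Pre_
  else (nxt, vis, score)

-- one execution of A's while-loop body ('for (r,c) in current: for (dr,dc) in [...]')
def iterA (input : List String) (cur : PySem.Set (Int × Int))
    (st : PySem.Set (Int × Int) × PySem.Set (Int × Int) × Int) :
    PySem.Set (Int × Int) × PySem.Set (Int × Int) × Int :=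
  cur.foldl (fun st rc =>
    [(rc.1 + 1, rc.2), (rc.1 - 1, rc.2), (rc.1, rc.2 + 1), (rc.1, rc.2 - 1)].foldl
      (candStepA input rc) st) st

-- 'while current:' — fuel-bounded recursion; the caller passes H*W+10 fuel, more than the
-- loop can ever run (each continuing iteration strictly grows visited ⊆ grid ∪ {start})
def bfsLoopA (input : List String) : Nat → PySem.Set (Int × Int) → PySem.Set (Int × Int) → Int → Int
  | 0, _, _, score => score
  | fuel + 1, cur, vis, score =>
    if cur = [] then score
    else
      let st := iterA input cur (PySem.Set.empty, vis, score)
      bfsLoopA input fuel st.1 st.2.1 st.2.2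

def bfsA (input : List String) (start : Int × Int) : Int :=
  bfsLoopA input (input.length * (input.headD "").toList.length + 10)
    (PySem.Set.add PySem.Set.empty start) (PySem.Set.add PySem.Set.empty start) 0

def part1 (input : List String) : Int :=
  -- heads: len(input[0]) is only evaluated when the outer loop runs, so headD "" is safe
  let heads : PySem.Set (Int × Int) :=
    (PySem.List.pyRange 0 (input.length : Int) 1).foldl (fun hs r =>
      (PySem.List.pyRange 0 ((input.headD "").toList.length : Int) 1).foldl (fun hs c =>
        if cellA input r c = some '0' then PySem.Set.add hs (r, c) else hs) hs) PySem.Set.empty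
  -- summing bfs over the heads set is iteration-order independent
  heads.foldl (fun score head => score + bfsA input head) 0

-- ===== PORT B =====
-- input[r][c] as an optional char (none = Python IndexError, outside Pre_)
def cellB (input : List String) (r c : Int) : Option Char :=
  (PySem.List.pyGet? input r).bind (fun row => PySem.Str.pyGet? row c)

-- one pass of B's outer 'for ch in "9876543210"' loop: give every cell labelled ch its
-- reachable-'9' set (for ch = '9' the singleton; otherwise the union of the sets already
-- stored for its in-bounds neighbours labelled chr(ord(ch)+1))
def charPass (input : List String) (H W : Int)
    (reach : PySem.Dict (Int × Int) (PySem.Set (Int × Int))) (ch : Char) :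
    PySem.Dict (Int × Int) (PySem.Set (Int × Int)) :=
  (PySem.List.pyRange 0 H 1).foldl (fun reach r =>
    (PySem.List.pyRange 0 W 1).foldl (fun reach c =>
      if cellB input r c = some ch then
        if ch = '9' then reach.insert (r, c) (PySem.Set.add PySem.Set.empty (r, c))
        else
          reach.insert (r, c)
            ([(r + 1, c), (r - 1, c), (r, c + 1), (r, c - 1)].foldl (fun s d =>
              if 0 ≤ d.1 ∧ d.1 < H ∧ 0 ≤ d.2 ∧ d.2 < W ∧
                  cellB input d.1 d.2 = some (Char.ofNat (ch.toNat + 1))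
              then PySem.Set.union s (reach.getD d PySem.Set.empty) else s) PySem.Set.empty)
      else reach) reach) reach

def buildReach (input : List String) (H W : Int) :
    PySem.Dict (Int × Int) (PySem.Set (Int × Int)) :=
  ("9876543210".toList).foldl (charPass input H W) PySem.Dict.empty

def part1_alt (input : List String) : Int :=
  let H : Int := (input.length : Int)
  let W : Int := if input = [] then 0 else ((input.headD "").toList.length : Int)
  let reach := buildReach input H W
  (PySem.List.pyRange 0 H 1).foldl (fun total r =>
    (PySem.List.pyRange 0 W 1).foldl (fun total c =>
      if cellB input r c = some '0' then
        total + (((reach.getD (r, c) PySem.Set.empty).length : Nat) : Int)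
      else total) total) 0

-- ===== PRECONDITION & SPEC =====
-- Pre_ excludes the inputs on which A raises: a row shorter than the first row (IndexError in
-- the head scan) and grids where int() hits a non-digit cell while walking up from a '0' head
-- (ValueError).  Exactly which non-digit cells A's walk reaches is a reachability property,
-- not a checkable shape, so when a '0' head exists Pre_ requires every cell of the
-- first-row-width prefix to be a digit; this over-approximation also excludes some grids with
-- a head plus a never-reached non-digit cell, on which A returns and B returns the same value
-- (see claim cites).
def Pre_part1 (input : List String) : Prop :=
  input = [] ∨
  ((input.all (fun row =>
      decide ((input.headD "").toList.length ≤ row.toList.length))) = true ∧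
   ((input.any (fun row =>
      (row.toList.take (input.headD "").toList.length).contains '0')) = true →
    (input.all (fun row =>
      (row.toList.take (input.headD "").toList.length).all
        (fun ch => PySem.Chars.isdigit ch))) = true))
instance (input : List String) : Decidable (Pre_part1 input) := by unfold Pre_part1; infer_instance

def pvWitness_part1 : List String := ["01", "92"]

def Spec_part1 (input : List String) (out : Int) : Prop := out = part1_alt input
instance (input : List String) (out : Int) : Decidable (Spec_part1 input out) := by unfold Spec_part1; infer_instance

-- ===== CLAIM (what is proved, stated in full; the proofs are below) =====
def Claim_equal_part1 : Prop := ∀ (input : List String), Dom_part1 input → Pre_part1 input → Spec_part1 input (part1 input)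

-- ===== LEMMAS AND PROOFS =====

-- x is a coordinate of the W-prefix grid that both programs walk
def inGrid (input : List String) (x : Int × Int) : Prop :=
  0 ≤ x.1 ∧ x.1 < (input.length : Int) ∧ 0 ≤ x.2 ∧ x.2 < ((input.headD "").toList.length : Int)

def digitChar : Nat → Char
  | 0 => '0' | 1 => '1' | 2 => '2' | 3 => '3' | 4 => '4'
  | 5 => '5' | 6 => '6' | 7 => '7' | 8 => '8' | 9 => '9' | _ => ' '

-- Prop form of Pre_'s second disjunct used throughout the proofs
def GoodGrid (input : List String) : Prop :=
  (∀ row ∈ input, (input.headD "").toList.length ≤ row.toList.length) ∧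
  (∀ row ∈ input, ∀ ch ∈ row.toList.take (input.headD "").toList.length,
    PySem.Chars.isdigit ch = true)

-- z is a '9'-cell reachable from x in exactly n strictly-height-increasing steps
-- (x sits at height 9-n, its neighbours on the path at heights 9-n+1, …, 9)
def NineP (input : List String) : Nat → (Int × Int) → (Int × Int) → Prop
  | 0, x, z => z = x
  | n + 1, x, z => ∃ y ∈ [(x.1 + 1, x.2), (x.1 - 1, x.2), (x.1, x.2 + 1), (x.1, x.2 - 1)],
      inGrid input y ∧ cellA input y.1 y.2 = some (digitChar (9 - n)) ∧ NineP input n y z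

-- proof-side description of one frontier step at height character h
def stepB (input : List String) (h : Char) (frontier : PySem.Set (Int × Int)) : PySem.Set (Int × Int) :=
  frontier.foldl (fun nxt fc =>
    [(fc.1 + 1, fc.2), (fc.1 - 1, fc.2), (fc.1, fc.2 + 1), (fc.1, fc.2 - 1)].foldl
      (fun nxt ac =>
        if 0 ≤ ac.1 ∧ ac.1 < (input.length : Int) ∧ 0 ≤ ac.2 ∧ ac.2 < ((input.headD "").toList.length : Int)
            ∧ cellB input ac.1 ac.2 = some h then PySem.Set.add nxt ac else nxt) nxt)
    PySem.Set.empty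

theorem cellB_eq : cellB = cellA := rfl

theorem digitChar_toNat {k : Nat} (hk : k ≤ 9) : (digitChar k).toNat = 48 + k := by
  interval_cases k <;> decide

theorem digitChar_inj {j k : Nat} (hj : j ≤ 9) (hk : k ≤ 9) (h : digitChar j = digitChar k) :
    j = k := by
  have := congrArg Char.toNat h
  rw [digitChar_toNat hj, digitChar_toNat hk] at this
  omega

theorem digitChar_succ {k : Nat} (hk : k ≤ 8) :
    Char.ofNat ((digitChar k).toNat + 1) = digitChar (k + 1) := by
  interval_cases k <;> decide

theorem isdigit_iff {ch : Char} :
    PySem.Chars.isdigit ch = true ↔ 48 ≤ ch.toNat ∧ ch.toNat ≤ 57 := by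
  simp [PySem.Chars.isdigit, Char.le_def, UInt32.le_iff_toNat_le]

theorem eq_digitChar_of_isdigit {ch : Char} (h : PySem.Chars.isdigit ch = true) :
    ch = digitChar (ch.toNat - 48) := by
  obtain ⟨h1, h2⟩ := isdigit_iff.mp h
  apply Char.ext
  apply UInt32.toNat_inj.mp
  show ch.toNat = (digitChar (ch.toNat - 48)).toNat
  rw [digitChar_toNat (by omega)]
  omega

theorem ofChars?_digit {ch : Char} (h : PySem.Chars.isdigit ch = true) :
    PySem.Int.ofChars? [ch] = some ((ch.toNat : Int) - 48) := by
  obtain ⟨h1, h2⟩ := isdigit_iff.mp h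
  rw [eq_digitChar_of_isdigit h]
  have hle : ch.toNat - 48 ≤ 9 := by omega
  generalize ch.toNat - 48 = n at *
  interval_cases n <;> decide

theorem pyGet?_nonneg {α : Type} (xs : List α) (i : Int) (h0 : 0 ≤ i) :
    PySem.List.pyGet? xs i = xs[i.toNat]? := by
  have h : i = ((i.toNat : Nat) : Int) := by omega
  rw [h, PySem.List.pyGet?_natCast, Int.toNat_natCast]

theorem cell_mem_take {input : List String}
    (hshape : ∀ row ∈ input, (input.headD "").toList.length ≤ row.toList.length)
    {x : Int × Int} (hx : inGrid input x) :
    ∃ ch row, row ∈ input ∧ cellA input x.1 x.2 = some ch ∧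
      ch ∈ row.toList.take (input.headD "").toList.length := by
  obtain ⟨h1, h2, h3, h4⟩ := hx
  have hr : x.1.toNat < input.length := by omega
  have hlen : (input.headD "").toList.length ≤ (input[x.1.toNat]).toList.length :=
    hshape _ (List.getElem_mem hr)
  have hc2 : x.2.toNat < (input.headD "").toList.length := by omega
  have hc : x.2.toNat < (input[x.1.toNat]).toList.length := by omega
  refine ⟨(input[x.1.toNat]).toList[x.2.toNat], input[x.1.toNat], List.getElem_mem hr, ?_, ?_⟩
  · unfold cellA
    rw [pyGet?_nonneg _ _ h1]
    simp only [hr, List.getElem?_eq_getElem, Option.bind_some, PySem.Str.pyGet?_eq,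
      PySem.Chars.pyGet?_eq_listPyGet?]
    rw [pyGet?_nonneg _ _ h3]
    simp
  · rw [List.mem_take_iff_getElem]
    exact ⟨x.2.toNat, by omega, rfl⟩

theorem cell_of_inGrid {input : List String} (hg : GoodGrid input) {x : Int × Int}
    (hx : inGrid input x) :
    ∃ ch, cellA input x.1 x.2 = some ch ∧ PySem.Chars.isdigit ch = true := by
  obtain ⟨ch, row, hrow, hcell, htake⟩ := cell_mem_take hg.1 hx
  exact ⟨ch, hcell, hg.2 _ hrow _ htake⟩

-- generic paired-foldl lemma
theorem pvFoldlRel {α σ τ : Type} (R : σ → τ → Prop) (f : σ → α → σ) (g : τ → α → τ)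
    (l : List α) (h : ∀ s t x, x ∈ l → R s t → R (f s x) (g t x)) :
    ∀ s t, R s t → R (l.foldl f s) (l.foldl g t) := by
  induction l with
  | nil => intro s t hst; exact hst
  | cons x xs ih =>
    intro s t hst
    exact ih (fun s t y hy => h s t y (List.mem_cons_of_mem _ hy)) _ _
      (h s t x List.mem_cons_self hst)

-- generic invariant-preservation for foldl
theorem pvFoldlInv {α σ : Type} (Q : σ → Prop) (f : σ → α → σ) (l : List α)
    (h : ∀ s x, x ∈ l → Q s → Q (f s x)) : ∀ s, Q s → Q (l.foldl f s) := by
  induction l with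
  | nil => intro s hs; exact hs
  | cons x xs ih =>
    intro s hs
    exact ih (fun s y hy => h s y (List.mem_cons_of_mem _ hy)) _ (h s x List.mem_cons_self hs)

theorem stepB_mem' {input : List String} {h : Char} {fr : PySem.Set (Int × Int)}
    {y : Int × Int} (hy : y ∈ stepB input h fr) :
    inGrid input y ∧ cellA input y.1 y.2 = some h := by
  revert y
  show ∀ y ∈ stepB input h fr, _
  unfold stepB
  refine pvFoldlInv (fun s => ∀ y ∈ s, inGrid input y ∧ cellA input y.1 y.2 = some h)
    _ fr ?_ _ ?_
  · intro s x _ hQ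
    refine pvFoldlInv (fun s => ∀ y ∈ s, inGrid input y ∧ cellA input y.1 y.2 = some h)
      _ _ ?_ _ hQ
    intro s' d _ hQ'
    by_cases hcond : 0 ≤ d.1 ∧ d.1 < (input.length : Int) ∧ 0 ≤ d.2 ∧
        d.2 < ((input.headD "").toList.length : Int) ∧ cellB input d.1 d.2 = some h
    · rw [if_pos hcond]
      intro y hy
      rcases (PySem.Set.mem_add _ _ _).mp hy with hy | rfl
      · exact hQ' y hy
      · exact ⟨⟨hcond.1, hcond.2.1, hcond.2.2.1, hcond.2.2.2.1⟩, hcond.2.2.2.2⟩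
    · rw [if_neg hcond]; exact hQ'
  · intro y hy; exact absurd hy (List.not_mem_nil)

theorem stepB_nil (input : List String) (hs : List Char) :
    hs.foldl (fun fr h => stepB input h fr) [] = [] := by
  induction hs with
  | nil => rfl
  | cons h t ih => simpa [stepB] using ih

-- relation between A's inner-loop state and the frontier under construction (levels 1..8)
def RelNe9 (input : List String) (k : Nat) (vis0 : PySem.Set (Int × Int)) (score0 : Int)
    (st : PySem.Set (Int × Int) × PySem.Set (Int × Int) × Int) (nxt : PySem.Set (Int × Int)) : Prop :=
  st = (nxt, vis0 ++ nxt, score0) ∧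
  ∀ y ∈ nxt, inGrid input y ∧ cellA input y.1 y.2 = some (digitChar (k + 1))

-- relation for the last level: A only counts (score) what the frontier iteration collects
def Rel9 (input : List String) (vis0 : PySem.Set (Int × Int)) (score0 : Int)
    (st : PySem.Set (Int × Int) × PySem.Set (Int × Int) × Int) (nxt : PySem.Set (Int × Int)) : Prop :=
  st = (PySem.Set.empty, vis0 ++ nxt, score0 + nxt.length) ∧
  ∀ y ∈ nxt, cellA input y.1 y.2 = some '9'

theorem cand_ne9 {input : List String} (hg : GoodGrid input) {k : Nat} (hk : k ≤ 7)
    {vis0 : PySem.Set (Int × Int)} {score0 : Int}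
    (hvis : ∀ y ∈ vis0, ∃ j ≤ k, cellA input y.1 y.2 = some (digitChar j))
    {x : Int × Int} (hx : cellA input x.1 x.2 = some (digitChar k))
    (st : PySem.Set (Int × Int) × PySem.Set (Int × Int) × Int) (nxt : PySem.Set (Int × Int))
    (d : Int × Int) (hR : RelNe9 input k vis0 score0 st nxt) :
    RelNe9 input k vis0 score0 (candStepA input x st d)
      (if 0 ≤ d.1 ∧ d.1 < (input.length : Int) ∧ 0 ≤ d.2 ∧
          d.2 < ((input.headD "").toList.length : Int) ∧
          cellB input d.1 d.2 = some (digitChar (k + 1))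
        then PySem.Set.add nxt d else nxt) := by
  obtain ⟨hst, hmem⟩ := hR
  subst hst
  unfold candStepA
  dsimp only
  by_cases hbnd : 0 ≤ d.1 ∧ d.1 < (input.length : Int) ∧ 0 ≤ d.2 ∧
      d.2 < ((input.headD "").toList.length : Int)
  · obtain ⟨ch, hch, hdig⟩ := cell_of_inGrid hg (show inGrid input d from hbnd)
    have hxint : intCellA input x.1 x.2 = some (k : Int) := by
      unfold intCellA
      rw [hx, Option.bind_some, ofChars?_digit (by rw [isdigit_iff, digitChar_toNat (by omega)]; omega)]
      rw [digitChar_toNat (by omega)]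
      congr 1; push_cast; ring
    have hdint : intCellA input d.1 d.2 = some ((ch.toNat : Int) - 48) := by
      unfold intCellA
      rw [hch, Option.bind_some, ofChars?_digit hdig]
    by_cases hc : ch = digitChar (k + 1)
    · subst hc
      have hBguard : 0 ≤ d.1 ∧ d.1 < (input.length : Int) ∧ 0 ≤ d.2 ∧
          d.2 < ((input.headD "").toList.length : Int) ∧
          cellB input d.1 d.2 = some (digitChar (k + 1)) := by
        exact ⟨hbnd.1, hbnd.2.1, hbnd.2.2.1, hbnd.2.2.2, by rw [cellB_eq]; exact hch⟩
      rw [if_pos hBguard]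
      have hnv0 : d ∉ vis0 := by
        intro hd
        obtain ⟨j, hj, hcell⟩ := hvis d hd
        rw [hch] at hcell
        have := digitChar_inj (by omega) (by omega) (Option.some.inj hcell).symm
        omega
      by_cases hm : d ∈ nxt
      · rw [if_neg (by simp [hm])]
        rw [PySem.Set.add_of_mem hm]
        exact ⟨rfl, hmem⟩
      · have hnv : ¬ d ∈ vis0 ++ nxt := by
          simp only [List.mem_append]; tauto
        rw [if_pos ⟨hbnd.1, hbnd.2.1, hbnd.2.2.1, hbnd.2.2.2, hnv⟩]
        rw [hdint, hxint]
        have hval : ((digitChar (k + 1)).toNat : Int) - 48 = (k : Int) + 1 := by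
          rw [digitChar_toNat (by omega)]; push_cast; ring
        rw [hval]
        dsimp only
        rw [if_pos rfl]
        have h9 : ¬ cellA input d.1 d.2 = some '9' := by
          rw [hch]
          intro hcontra
          have h99 : digitChar (k + 1) = digitChar 9 := Option.some.inj hcontra
          have := digitChar_inj (by omega) (by omega) h99
          omega
        rw [if_neg h9]
        rw [PySem.Set.add_of_not_mem hm, PySem.Set.add_of_not_mem hnv]
        refine ⟨by rw [List.append_assoc], ?_⟩
        intro y hy
        rcases List.mem_append.mp hy with hy | hy
        · exact hmem y hy
        · rw [List.mem_singleton.mp hy]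
          exact ⟨hbnd, hch⟩
    · have hBguard : ¬ (0 ≤ d.1 ∧ d.1 < (input.length : Int) ∧ 0 ≤ d.2 ∧
          d.2 < ((input.headD "").toList.length : Int) ∧
          cellB input d.1 d.2 = some (digitChar (k + 1))) := by
        rw [cellB_eq]
        intro hcontra
        rw [hch] at hcontra
        exact hc (Option.some.inj hcontra.2.2.2.2)
      rw [if_neg hBguard]
      by_cases hm : d ∈ vis0 ++ nxt
      · rw [if_neg (by simp [hm])]
        exact ⟨rfl, hmem⟩
      · rw [if_pos ⟨hbnd.1, hbnd.2.1, hbnd.2.2.1, hbnd.2.2.2, hm⟩]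
        rw [hdint, hxint]
        dsimp only
        have hne : ¬ ((ch.toNat : Int) - 48 = (k : Int) + 1) := by
          intro heq
          apply hc
          rw [eq_digitChar_of_isdigit hdig]
          congr 1
          omega
        rw [if_neg hne]
        exact ⟨rfl, hmem⟩
  · rw [if_neg (by tauto), if_neg (by tauto)]
    exact ⟨rfl, hmem⟩

theorem cand_9 {input : List String} (hg : GoodGrid input)
    {vis0 : PySem.Set (Int × Int)} {score0 : Int}
    (hvis : ∀ y ∈ vis0, ∃ j ≤ 8, cellA input y.1 y.2 = some (digitChar j))
    {x : Int × Int} (hx : cellA input x.1 x.2 = some (digitChar 8))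
    (st : PySem.Set (Int × Int) × PySem.Set (Int × Int) × Int) (nxt : PySem.Set (Int × Int))
    (d : Int × Int) (hR : Rel9 input vis0 score0 st nxt) :
    Rel9 input vis0 score0 (candStepA input x st d)
      (if 0 ≤ d.1 ∧ d.1 < (input.length : Int) ∧ 0 ≤ d.2 ∧
          d.2 < ((input.headD "").toList.length : Int) ∧
          cellB input d.1 d.2 = some '9'
        then PySem.Set.add nxt d else nxt) := by
  obtain ⟨hst, hmem⟩ := hR
  subst hst
  unfold candStepA
  dsimp only
  by_cases hbnd : 0 ≤ d.1 ∧ d.1 < (input.length : Int) ∧ 0 ≤ d.2 ∧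
      d.2 < ((input.headD "").toList.length : Int)
  · obtain ⟨ch, hch, hdig⟩ := cell_of_inGrid hg (show inGrid input d from hbnd)
    have hxint : intCellA input x.1 x.2 = some (8 : Int) := by
      unfold intCellA
      rw [hx, Option.bind_some, ofChars?_digit (by rw [isdigit_iff]; decide)]
      rw [digitChar_toNat (by omega)]
      norm_num
    have hdint : intCellA input d.1 d.2 = some ((ch.toNat : Int) - 48) := by
      unfold intCellA
      rw [hch, Option.bind_some, ofChars?_digit hdig]
    by_cases hc : ch = '9'
    · subst hc
      have hBguard : 0 ≤ d.1 ∧ d.1 < (input.length : Int) ∧ 0 ≤ d.2 ∧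
          d.2 < ((input.headD "").toList.length : Int) ∧ cellB input d.1 d.2 = some '9' := by
        exact ⟨hbnd.1, hbnd.2.1, hbnd.2.2.1, hbnd.2.2.2, by rw [cellB_eq]; exact hch⟩
      rw [if_pos hBguard]
      have hnv0 : d ∉ vis0 := by
        intro hd
        obtain ⟨j, hj, hcell⟩ := hvis d hd
        rw [hch] at hcell
        have h9 : '9' = digitChar 9 := by decide
        rw [h9] at hcell
        have h99 : digitChar 9 = digitChar j := Option.some.inj hcell
        have := digitChar_inj (by omega) (by omega) h99
        omega
      by_cases hm : d ∈ nxt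
      · rw [if_neg (by simp [hm])]
        rw [PySem.Set.add_of_mem hm]
        exact ⟨rfl, hmem⟩
      · have hnv : ¬ d ∈ vis0 ++ nxt := by
          simp only [List.mem_append]; tauto
        rw [if_pos ⟨hbnd.1, hbnd.2.1, hbnd.2.2.1, hbnd.2.2.2, hnv⟩]
        rw [hdint, hxint]
        dsimp only
        rw [if_pos (by norm_num [show '9'.toNat = 57 from rfl]), if_pos hch]
        rw [PySem.Set.add_of_not_mem hm, PySem.Set.add_of_not_mem hnv]
        refine ⟨?_, ?_⟩
        · simp only [Prod.mk.injEq, List.append_assoc, List.length_append, List.length_cons,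
            List.length_nil, true_and]
          push_cast
          ring
        · intro y hy
          rcases List.mem_append.mp hy with hy' | hy'
          · exact hmem y hy'
          · rw [List.mem_singleton.mp hy']
            exact hch
    · have hBguard : ¬ (0 ≤ d.1 ∧ d.1 < (input.length : Int) ∧ 0 ≤ d.2 ∧
          d.2 < ((input.headD "").toList.length : Int) ∧ cellB input d.1 d.2 = some '9') := by
        rw [cellB_eq]
        intro hcontra
        rw [hch] at hcontra
        exact hc (Option.some.inj hcontra.2.2.2.2)
      rw [if_neg hBguard]
      by_cases hm : d ∈ vis0 ++ nxt
      · rw [if_neg (by simp [hm])]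
        exact ⟨rfl, hmem⟩
      · rw [if_pos ⟨hbnd.1, hbnd.2.1, hbnd.2.2.1, hbnd.2.2.2, hm⟩]
        rw [hdint, hxint]
        dsimp only
        have hne : ¬ ((ch.toNat : Int) - 48 = (8 : Int) + 1) := by
          intro heq
          apply hc
          rw [eq_digitChar_of_isdigit hdig]
          have : ch.toNat - 48 = 9 := by omega
          rw [this]; rfl
        rw [if_neg hne]
        exact ⟨rfl, hmem⟩
  · rw [if_neg (by tauto), if_neg (by tauto)]
    exact ⟨rfl, hmem⟩

theorem iter_ne9 {input : List String} (hg : GoodGrid input) {k : Nat} (hk : k ≤ 7)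
    {cur vis0 : PySem.Set (Int × Int)} {score0 : Int}
    (hcur : ∀ x ∈ cur, inGrid input x ∧ cellA input x.1 x.2 = some (digitChar k))
    (hvis : ∀ y ∈ vis0, ∃ j ≤ k, cellA input y.1 y.2 = some (digitChar j)) :
    RelNe9 input k vis0 score0 (iterA input cur (PySem.Set.empty, vis0, score0))
      (stepB input (digitChar (k + 1)) cur) := by
  unfold iterA stepB
  refine pvFoldlRel (RelNe9 input k vis0 score0) _ _ cur ?_ _ _ ?_
  · intro s t x hx hR
    exact pvFoldlRel (RelNe9 input k vis0 score0) _ _ _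
      (fun s t d _ hR => cand_ne9 hg hk hvis (hcur x hx).2 s t d hR) s t hR
  · exact ⟨by simp [PySem.Set.empty], by intro y hy; exact absurd hy List.not_mem_nil⟩

theorem iter_9 {input : List String} (hg : GoodGrid input)
    {cur vis0 : PySem.Set (Int × Int)} {score0 : Int}
    (hcur : ∀ x ∈ cur, inGrid input x ∧ cellA input x.1 x.2 = some (digitChar 8))
    (hvis : ∀ y ∈ vis0, ∃ j ≤ 8, cellA input y.1 y.2 = some (digitChar j)) :
    Rel9 input vis0 score0 (iterA input cur (PySem.Set.empty, vis0, score0))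
      (stepB input '9' cur) := by
  unfold iterA stepB
  refine pvFoldlRel (Rel9 input vis0 score0) _ _ cur ?_ _ _ ?_
  · intro s t x hx hR
    exact pvFoldlRel (Rel9 input vis0 score0) _ _ _
      (fun s t d _ hR => cand_9 hg hvis (hcur x hx).2 s t d hR) s t hR
  · exact ⟨by simp [PySem.Set.empty], by intro y hy; exact absurd hy List.not_mem_nil⟩

theorem bfsLoopA_nil (input : List String) (fuel : Nat) (hf : 1 ≤ fuel)
    (vis : PySem.Set (Int × Int)) (s : Int) : bfsLoopA input fuel [] vis s = s := by
  match fuel with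
  | 0 => omega
  | f + 1 => rw [bfsLoopA, if_pos rfl]

theorem loopEq {input : List String} (hg : GoodGrid input) :
    ∀ (fuel k : Nat) (cur vis : PySem.Set (Int × Int)) (score : Int), k ≤ 8 →
    (∀ x ∈ cur, inGrid input x ∧ cellA input x.1 x.2 = some (digitChar k)) →
    (∀ y ∈ vis, ∃ j ≤ k, cellA input y.1 y.2 = some (digitChar j)) →
    10 - k ≤ fuel →
    bfsLoopA input fuel cur vis score
      = score + ((("0123456789".toList).drop (k + 1)).foldl
          (fun fr h => stepB input h fr) cur).length := by
  intro fuel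
  induction fuel with
  | zero => intro k cur vis score hk _ _ hfuel; omega
  | succ f ih =>
    intro k cur vis score hk hcur hvis hfuel
    by_cases hcur0 : cur = ([] : List (Int × Int))
    · subst hcur0
      rw [bfsLoopA, if_pos rfl, stepB_nil]
      simp
    · rw [bfsLoopA, if_neg hcur0]
      rcases Nat.lt_or_ge k 8 with hk8 | hk8
      · have h7 : k ≤ 7 := by omega
        obtain ⟨hstate, hmemN⟩ := iter_ne9 (score0 := score) hg h7 hcur hvis
        rw [hstate]
        have hdrop : ("0123456789".toList).drop (k + 1)
            = digitChar (k + 1) :: ("0123456789".toList).drop (k + 2) := by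
          interval_cases k <;> decide
        rw [hdrop, List.foldl_cons]
        exact ih (k + 1) _ _ score (by omega)
          (fun x hx => stepB_mem' hx)
          (by
            intro y hy
            rcases List.mem_append.mp hy with hy | hy
            · obtain ⟨j, hj, hc⟩ := hvis y hy
              exact ⟨j, by omega, hc⟩
            · exact ⟨k + 1, le_refl _, (stepB_mem' hy).2⟩)
          (by omega)
      · have hk8' : k = 8 := by omega
        subst hk8'
        obtain ⟨hstate, hmemN⟩ := iter_9 (score0 := score) hg hcur hvis
        rw [hstate]
        dsimp only [PySem.Set.empty]
        have hdrop : ("0123456789".toList).drop (8 + 1) = ['9'] := by decide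
        rw [bfsLoopA_nil input f (by omega)]
        rw [hdrop, List.foldl_cons, List.foldl_nil]

-- ===== membership characterisations (shared ground: NineP) =====

theorem mem_foldl_if_add {α : Type} [BEq α] [LawfulBEq α] (p : α → Prop) [DecidablePred p] :
    ∀ (l : List α) (s : List α) (y : α),
      (y ∈ l.foldl (fun s d => if p d then PySem.Set.add s d else s) s) ↔
        y ∈ s ∨ (y ∈ l ∧ p y) := by
  intro l
  induction l with
  | nil => intro s y; simp
  | cons d t ih =>
    intro s y
    rw [List.foldl_cons, ih]
    by_cases hp : p d
    · rw [if_pos hp, PySem.Set.mem_add]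
      constructor
      · rintro ((hy | rfl) | hy)
        · exact Or.inl hy
        · exact Or.inr ⟨List.mem_cons_self, hp⟩
        · exact Or.inr ⟨List.mem_cons_of_mem _ hy.1, hy.2⟩
      · rintro (hy | ⟨hy, hpy⟩)
        · exact Or.inl (Or.inl hy)
        · rcases List.mem_cons.mp hy with rfl | hy
          · exact Or.inl (Or.inr rfl)
          · exact Or.inr ⟨hy, hpy⟩
    · rw [if_neg hp]
      constructor
      · rintro (hy | hy)
        · exact Or.inl hy
        · exact Or.inr ⟨List.mem_cons_of_mem _ hy.1, hy.2⟩
      · rintro (hy | ⟨hy, hpy⟩)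
        · exact Or.inl hy
        · rcases List.mem_cons.mp hy with rfl | hy
          · exact absurd hpy hp
          · exact Or.inr ⟨hy, hpy⟩

theorem mem_foldl_acc {α β : Type} (F : List β → α → List β) (Q : α → β → Prop)
    (hF : ∀ s x y, y ∈ F s x ↔ y ∈ s ∨ Q x y) :
    ∀ (l : List α) (s : List β) (y : β), y ∈ l.foldl F s ↔ y ∈ s ∨ ∃ x ∈ l, Q x y := by
  intro l
  induction l with
  | nil => intro s y; simp
  | cons x t ih =>
    intro s y
    rw [List.foldl_cons, ih, hF]
    constructor
    · rintro ((hy | hq) | ⟨x', hx', hq⟩)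
      · exact Or.inl hy
      · exact Or.inr ⟨x, List.mem_cons_self, hq⟩
      · exact Or.inr ⟨x', List.mem_cons_of_mem _ hx', hq⟩
    · rintro (hy | ⟨x', hx', hq⟩)
      · exact Or.inl (Or.inl hy)
      · rcases List.mem_cons.mp hx' with rfl | hx'
        · exact Or.inl (Or.inr hq)
        · exact Or.inr ⟨x', hx', hq⟩

theorem mem_stepB {input : List String} {h : Char} {S : PySem.Set (Int × Int)} {y : Int × Int} :
    y ∈ stepB input h S ↔
      (∃ x ∈ S, y ∈ [(x.1 + 1, x.2), (x.1 - 1, x.2), (x.1, x.2 + 1), (x.1, x.2 - 1)]) ∧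
        inGrid input y ∧ cellA input y.1 y.2 = some h := by
  unfold stepB
  refine (mem_foldl_acc _
    (fun x y => y ∈ [(x.1 + 1, x.2), (x.1 - 1, x.2), (x.1, x.2 + 1), (x.1, x.2 - 1)] ∧
      inGrid input y ∧ cellA input y.1 y.2 = some h) ?_ S PySem.Set.empty y).trans ?_
  · intro s x y
    refine (mem_foldl_if_add (fun d : Int × Int => 0 ≤ d.1 ∧ d.1 < (input.length : Int) ∧
        0 ≤ d.2 ∧ d.2 < ((input.headD "").toList.length : Int) ∧
        cellB input d.1 d.2 = some h) _ s y).trans ?_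
    simp only [inGrid, cellB_eq]
    tauto
  · simp only [PySem.Set.empty, List.not_mem_nil, false_or]
    constructor
    · rintro ⟨x, hx, hnb, hrest⟩; exact ⟨⟨x, hx, hnb⟩, hrest⟩
    · rintro ⟨⟨x, hx, hnb⟩, hrest⟩; exact ⟨x, hx, hnb, hrest⟩

theorem nodup_foldl_if_add {α : Type} [BEq α] [LawfulBEq α] (p : α → Prop) [DecidablePred p]
    (l : List α) (s : List α) (hs : s.Nodup) :
    (l.foldl (fun s d => if p d then PySem.Set.add s d else s) s).Nodup := by
  refine pvFoldlInv List.Nodup _ l ?_ s hs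
  intro s d _ hsd
  by_cases hp : p d
  · rw [if_pos hp]; exact PySem.Set.nodup_add _ _ hsd
  · rw [if_neg hp]; exact hsd

theorem nodup_stepB (input : List String) (h : Char) (S : PySem.Set (Int × Int)) :
    (stepB input h S).Nodup := by
  unfold stepB
  refine pvFoldlInv List.Nodup _ S ?_ _ List.nodup_nil
  intro s x _ hsd
  exact nodup_foldl_if_add _ _ _ hsd

theorem hdropChar {m : Nat} (hm : m ≤ 8) :
    ("0123456789".toList).drop (m + 1)
      = digitChar (m + 1) :: ("0123456789".toList).drop (m + 2) := by
  interval_cases m <;> decide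

theorem frontier_mem (input : List String) :
    ∀ (n : Nat), n ≤ 9 → ∀ (S : PySem.Set (Int × Int)),
    (∀ x ∈ S, inGrid input x ∧ cellA input x.1 x.2 = some (digitChar (9 - n))) →
    ∀ z, (z ∈ (("0123456789".toList).drop (9 - n + 1)).foldl
            (fun fr h => stepB input h fr) S) ↔ ∃ x ∈ S, NineP input n x z := by
  intro n
  induction n with
  | zero =>
    intro _ S _ z
    have : ("0123456789".toList).drop (9 - 0 + 1) = [] := by decide
    rw [this, List.foldl_nil]
    simp [NineP]
  | succ n ih =>
    intro hn S hS z
    have hk : 9 - (n + 1) ≤ 8 := by omega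
    rw [hdropChar hk, List.foldl_cons]
    have e1 : 9 - (n + 1) + 1 = 9 - n := by omega
    have e2 : 9 - (n + 1) + 2 = 9 - n + 1 := by omega
    rw [e1, e2]
    rw [ih (by omega) (stepB input (digitChar (9 - n)) S)
      (fun x hx => ⟨(mem_stepB.mp hx).2.1, (mem_stepB.mp hx).2.2⟩)]
    constructor
    · rintro ⟨y, hy, hnine⟩
      obtain ⟨⟨x, hx, hnb⟩, hgrid, hcell⟩ := mem_stepB.mp hy
      exact ⟨x, hx, ⟨y, hnb, hgrid, hcell, hnine⟩⟩
    · rintro ⟨x, hx, y, hnb, hgrid, hcell, hnine⟩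
      exact ⟨y, mem_stepB.mpr ⟨⟨x, hx, hnb⟩, hgrid, hcell⟩, hnine⟩

-- ===== B-side: the DP dict stores exactly the NineP sets =====

-- the value B's pass stores at a cell of height character ch, computed against a fixed dict
def passVal (input : List String) (H W : Int)
    (reach₀ : PySem.Dict (Int × Int) (PySem.Set (Int × Int))) (ch : Char) (x : Int × Int) :
    PySem.Set (Int × Int) :=
  if ch = '9' then PySem.Set.add PySem.Set.empty x
  else [(x.1 + 1, x.2), (x.1 - 1, x.2), (x.1, x.2 + 1), (x.1, x.2 - 1)].foldl (fun s d =>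
    if 0 ≤ d.1 ∧ d.1 < H ∧ 0 ≤ d.2 ∧ d.2 < W ∧
        cellB input d.1 d.2 = some (Char.ofNat (ch.toNat + 1))
    then PySem.Set.union s (reach₀.getD d PySem.Set.empty) else s) PySem.Set.empty

-- the body of B's per-cell step, as a function of the coordinate pair
def passStep (input : List String) (H W : Int) (ch : Char)
    (reach : PySem.Dict (Int × Int) (PySem.Set (Int × Int))) (y : Int × Int) :
    PySem.Dict (Int × Int) (PySem.Set (Int × Int)) :=
  if cellB input y.1 y.2 = some ch then
    if ch = '9' then reach.insert y (PySem.Set.add PySem.Set.empty y)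
    else
      reach.insert y
        ([(y.1 + 1, y.2), (y.1 - 1, y.2), (y.1, y.2 + 1), (y.1, y.2 - 1)].foldl (fun s d =>
          if 0 ≤ d.1 ∧ d.1 < H ∧ 0 ≤ d.2 ∧ d.2 < W ∧
              cellB input d.1 d.2 = some (Char.ofNat (ch.toNat + 1))
          then PySem.Set.union s (reach.getD d PySem.Set.empty) else s) PySem.Set.empty)
  else reach

def coords (H W : Int) : List (Int × Int) :=
  (PySem.List.pyRange 0 H 1).flatMap (fun r => (PySem.List.pyRange 0 W 1).map (fun c => (r, c)))

theorem foldl_flatMap_map {σ : Type} (g : σ → Int × Int → σ) :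
    ∀ (rs : List Int) (cs : List Int) (d : σ),
      rs.foldl (fun d r => cs.foldl (fun d c => g d (r, c)) d) d
        = (rs.flatMap (fun r => cs.map (fun c => (r, c)))).foldl g d := by
  intro rs
  induction rs with
  | nil => intro cs d; simp
  | cons r t ih =>
    intro cs d
    rw [List.foldl_cons, List.flatMap_cons, List.foldl_append, List.foldl_map, ih]

theorem charPass_eq_foldl (input : List String) (H W : Int)
    (reach : PySem.Dict (Int × Int) (PySem.Set (Int × Int))) (ch : Char) :
    charPass input H W reach ch = (coords H W).foldl (passStep input H W ch) reach :=
  foldl_flatMap_map (passStep input H W ch) _ _ reach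

theorem pass_fold (input : List String) (H W : Int) (ch : Char)
    (hup : Char.ofNat (ch.toNat + 1) ≠ ch)
    (reach₀ : PySem.Dict (Int × Int) (PySem.Set (Int × Int))) :
    ∀ (L : List (Int × Int)) (d : PySem.Dict (Int × Int) (PySem.Set (Int × Int))),
      (∀ y : Int × Int, cellB input y.1 y.2 ≠ some ch → d.get? y = reach₀.get? y) →
      ∀ y : Int × Int, (L.foldl (passStep input H W ch) d).get? y =
        if y ∈ L ∧ cellB input y.1 y.2 = some ch then some (passVal input H W reach₀ ch y)
        else d.get? y := by
  intro L
  induction L with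
  | nil => intro d hinv y; simp
  | cons a t ih =>
    intro d hinv y
    rw [List.foldl_cons]
    have hinv1 : ∀ y : Int × Int, cellB input y.1 y.2 ≠ some ch →
        (passStep input H W ch d a).get? y = reach₀.get? y := by
      intro y hy
      unfold passStep
      by_cases hga : cellB input a.1 a.2 = some ch
      · rw [if_pos hga]
        have hya : y ≠ a := fun h => hy (h ▸ hga)
        by_cases h9 : ch = '9'
        · rw [if_pos h9, PySem.Dict.get?_insert, if_neg hya]; exact hinv y hy
        · rw [if_neg h9, PySem.Dict.get?_insert, if_neg hya]; exact hinv y hy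
      · rw [if_neg hga]; exact hinv y hy
    rw [ih _ hinv1 y]
    by_cases hyt : y ∈ t ∧ cellB input y.1 y.2 = some ch
    · rw [if_pos hyt, if_pos ⟨List.mem_cons_of_mem _ hyt.1, hyt.2⟩]
    · rw [if_neg hyt]
      by_cases hych : cellB input y.1 y.2 = some ch
      · by_cases hya : y = a
        · subst hya
          rw [if_pos ⟨List.mem_cons_self, hych⟩]
          unfold passStep
          rw [if_pos hych]
          by_cases h9 : ch = '9'
          · rw [if_pos h9, PySem.Dict.get?_insert, if_pos rfl]
            unfold passVal; rw [if_pos h9]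
          · rw [if_neg h9, PySem.Dict.get?_insert, if_pos rfl]
            unfold passVal; rw [if_neg h9]
            have hfun : (fun (s : PySem.Set (Int × Int)) (d' : Int × Int) =>
                if 0 ≤ d'.1 ∧ d'.1 < H ∧ 0 ≤ d'.2 ∧ d'.2 < W ∧
                    cellB input d'.1 d'.2 = some (Char.ofNat (ch.toNat + 1))
                then PySem.Set.union s (d.getD d' PySem.Set.empty) else s)
              = (fun (s : PySem.Set (Int × Int)) (d' : Int × Int) =>
                if 0 ≤ d'.1 ∧ d'.1 < H ∧ 0 ≤ d'.2 ∧ d'.2 < W ∧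
                    cellB input d'.1 d'.2 = some (Char.ofNat (ch.toNat + 1))
                then PySem.Set.union s (reach₀.getD d' PySem.Set.empty) else s) := by
              funext s d'
              by_cases hg : 0 ≤ d'.1 ∧ d'.1 < H ∧ 0 ≤ d'.2 ∧ d'.2 < W ∧
                  cellB input d'.1 d'.2 = some (Char.ofNat (ch.toNat + 1))
              · rw [if_pos hg, if_pos hg]
                have hnc : cellB input d'.1 d'.2 ≠ some ch := by
                  rw [hg.2.2.2.2]
                  intro hcontra
                  exact hup (Option.some.inj hcontra)
                rw [PySem.Dict.getD_eq_get?_getD, PySem.Dict.getD_eq_get?_getD, hinv d' hnc]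
              · rw [if_neg hg, if_neg hg]
            rw [hfun]
        · have hyn : ¬ (y ∈ a :: t ∧ cellB input y.1 y.2 = some ch) := by
            rintro ⟨hmem, _⟩
            rcases List.mem_cons.mp hmem with rfl | hmem
            · exact hya rfl
            · exact hyt ⟨hmem, hych⟩
          rw [if_neg hyn]
          unfold passStep
          by_cases hga : cellB input a.1 a.2 = some ch
          · rw [if_pos hga]
            by_cases h9 : ch = '9'
            · rw [if_pos h9, PySem.Dict.get?_insert, if_neg hya]
            · rw [if_neg h9, PySem.Dict.get?_insert, if_neg hya]
          · rw [if_neg hga]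
      · have hyn : ¬ (y ∈ a :: t ∧ cellB input y.1 y.2 = some ch) := fun h => hych h.2
        rw [if_neg hyn, hinv1 y hych, hinv y hych]

-- after processing heights 9 down to m, every grid cell of height k ≥ m has its correct set
def InvR (input : List String) (reach : PySem.Dict (Int × Int) (PySem.Set (Int × Int)))
    (m : Nat) : Prop :=
  ∀ (x : Int × Int) (k : Nat), m ≤ k → k ≤ 9 → inGrid input x →
    cellA input x.1 x.2 = some (digitChar k) →
    ∃ s, reach.get? x = some s ∧ s.Nodup ∧ ∀ z, z ∈ s ↔ NineP input (9 - k) x z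

theorem mem_foldl_if_union {α : Type} [BEq α] [LawfulBEq α] (p : α → Prop) [DecidablePred p]
    (f : α → List α) :
    ∀ (l : List α) (s : List α) (z : α),
      (z ∈ l.foldl (fun s d => if p d then PySem.Set.union s (f d) else s) s) ↔
        z ∈ s ∨ ∃ d ∈ l, p d ∧ z ∈ f d := by
  intro l
  induction l with
  | nil => intro s z; simp
  | cons d t ih =>
    intro s z
    rw [List.foldl_cons, ih]
    by_cases hp : p d
    · rw [if_pos hp, PySem.Set.mem_union]
      constructor
      · rintro ((hz | hz) | ⟨d', hd', hp', hz⟩)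
        · exact Or.inl hz
        · exact Or.inr ⟨d, List.mem_cons_self, hp, hz⟩
        · exact Or.inr ⟨d', List.mem_cons_of_mem _ hd', hp', hz⟩
      · rintro (hz | ⟨d', hd', hp', hz⟩)
        · exact Or.inl (Or.inl hz)
        · rcases List.mem_cons.mp hd' with rfl | hd'
          · exact Or.inl (Or.inr hz)
          · exact Or.inr ⟨d', hd', hp', hz⟩
    · rw [if_neg hp]
      constructor
      · rintro (hz | ⟨d', hd', hp', hz⟩)
        · exact Or.inl hz
        · exact Or.inr ⟨d', List.mem_cons_of_mem _ hd', hp', hz⟩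
      · rintro (hz | ⟨d', hd', hp', hz⟩)
        · exact Or.inl hz
        · rcases List.mem_cons.mp hd' with rfl | hd'
          · exact absurd hp' hp
          · exact Or.inr ⟨d', hd', hp', hz⟩

theorem nodup_foldl_if_union {α : Type} [BEq α] [LawfulBEq α] (p : α → Prop) [DecidablePred p]
    (f : α → List α) (l : List α) (s : List α) (hs : s.Nodup) :
    (l.foldl (fun s d => if p d then PySem.Set.union s (f d) else s) s).Nodup := by
  refine pvFoldlInv List.Nodup _ l ?_ s hs
  intro s d _ hsd
  by_cases hp : p d
  · rw [if_pos hp]; exact PySem.Set.nodup_union _ _ hsd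
  · rw [if_neg hp]; exact hsd

theorem pass_preserves {input : List String} {k : Nat} (hk : k ≤ 9)
    {reach₀ : PySem.Dict (Int × Int) (PySem.Set (Int × Int))}
    (hinv : InvR input reach₀ (k + 1)) :
    InvR input (charPass input (input.length : Int) ((input.headD "").toList.length : Int)
      reach₀ (digitChar k)) k := by
  intro x k' hk1 hk9 hgrid hcell
  have hup : Char.ofNat ((digitChar k).toNat + 1) ≠ digitChar k := by
    interval_cases k <;> decide
  rw [charPass_eq_foldl,
    pass_fold input _ _ (digitChar k) hup reach₀ _ reach₀ (fun y _ => rfl) x]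
  by_cases hkk : k' = k
  · subst hkk
    have hxmem : x ∈ coords (input.length : Int) ((input.headD "").toList.length : Int) := by
      unfold coords
      rw [List.mem_flatMap]
      refine ⟨x.1, PySem.List.mem_pyRange_one.mpr ⟨hgrid.1, hgrid.2.1⟩, ?_⟩
      rw [List.mem_map]
      exact ⟨x.2, PySem.List.mem_pyRange_one.mpr ⟨hgrid.2.2.1, hgrid.2.2.2⟩, rfl⟩
    rw [if_pos ⟨hxmem, by rw [cellB_eq]; exact hcell⟩]
    by_cases h9 : k' = 9
    · subst h9
      refine ⟨_, rfl, ?_, ?_⟩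
      · unfold passVal
        rw [if_pos (show digitChar 9 = '9' from rfl)]
        exact PySem.Set.nodup_add _ _ List.nodup_nil
      · intro z
        unfold passVal
        rw [if_pos (show digitChar 9 = '9' from rfl)]
        show z ∈ [x] ↔ NineP input (9 - 9) x z
        simp [NineP, eq_comm]
    · have hk8 : k' ≤ 8 := by omega
      have hne9 : digitChar k' ≠ '9' := by
        intro h
        have := digitChar_inj (by omega) (by omega) (h.trans (show '9' = digitChar 9 from rfl))
        omega
      refine ⟨_, rfl, ?_, ?_⟩
      · unfold passVal
        rw [if_neg hne9]
        exact nodup_foldl_if_union _ _ _ _ List.nodup_nil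
      · intro z
        unfold passVal
        rw [if_neg hne9]
        refine (mem_foldl_if_union
          (fun d : Int × Int => 0 ≤ d.1 ∧ d.1 < (input.length : Int) ∧ 0 ≤ d.2 ∧
            d.2 < ((input.headD "").toList.length : Int) ∧
            cellB input d.1 d.2 = some (Char.ofNat ((digitChar k').toNat + 1)))
          (fun d => reach₀.getD d PySem.Set.empty) _ _ z).trans ?_
      -- identify with NineP (9 - k') x z
        simp only [PySem.Set.empty, List.not_mem_nil, false_or]
        rw [digitChar_succ hk8]
        have hnine : 9 - k' = (9 - (k' + 1)) + 1 := by omega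
        rw [hnine]
        show _ ↔ ∃ y ∈ [(x.1 + 1, x.2), (x.1 - 1, x.2), (x.1, x.2 + 1), (x.1, x.2 - 1)],
          inGrid input y ∧ cellA input y.1 y.2 = some (digitChar (9 - (9 - (k' + 1)))) ∧
          NineP input (9 - (k' + 1)) y z
        have h99 : 9 - (9 - (k' + 1)) = k' + 1 := by omega
        rw [h99]
        constructor
        · rintro ⟨d, hd, ⟨hb1, hb2, hb3, hb4, hcd⟩, hz⟩
          rw [cellB_eq] at hcd
          have hgd : inGrid input d := ⟨hb1, hb2, hb3, hb4⟩
          obtain ⟨s, hs, _, hsm⟩ := hinv d (k' + 1) (le_refl _) (by omega) hgd hcd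
          rw [PySem.Dict.getD_of_get?_eq_some _ _ hs] at hz
          exact ⟨d, hd, hgd, hcd, (hsm z).mp hz⟩
        · rintro ⟨y, hy, hgy, hcy, hz⟩
          obtain ⟨s, hs, _, hsm⟩ := hinv y (k' + 1) (le_refl _) (by omega) hgy hcy
          refine ⟨y, hy, ⟨hgy.1, hgy.2.1, hgy.2.2.1, ?_, by rw [cellB_eq]; exact hcy⟩, ?_⟩
          · exact hgy.2.2.2
          · rw [PySem.Dict.getD_of_get?_eq_some _ _ hs]
            exact (hsm z).mpr hz
  · have hgt : k + 1 ≤ k' := by omega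
    have hnotch : ¬ (x ∈ coords (input.length : Int) ((input.headD "").toList.length : Int) ∧
        cellB input x.1 x.2 = some (digitChar k)) := by
      rintro ⟨_, h⟩
      rw [cellB_eq, hcell] at h
      exact hkk (digitChar_inj hk9 hk (Option.some.inj h))
    rw [if_neg hnotch]
    exact hinv x k' hgt hk9 hgrid hcell

theorem buildReach_invR (input : List String) :
    InvR input (buildReach input (input.length : Int) ((input.headD "").toList.length : Int)) 0 := by
  have h10 : InvR input PySem.Dict.empty 10 := by
    intro x k hk hk9 _ _
    omega
  unfold buildReach
  rw [show ("9876543210".toList) = ['9', '8', '7', '6', '5', '4', '3', '2', '1', '0'] from rfl]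
  simp only [List.foldl_cons, List.foldl_nil]
  exact pass_preserves (by omega) (pass_preserves (by omega) (pass_preserves (by omega)
    (pass_preserves (by omega) (pass_preserves (by omega) (pass_preserves (by omega)
    (pass_preserves (by omega) (pass_preserves (by omega) (pass_preserves (by omega)
    (pass_preserves (by omega) h10)))))))))

-- ===== per-head equality =====

theorem bfs_eq_len {input : List String} (hg : GoodGrid input) {x : Int × Int}
    (hx : inGrid input x) (h0 : cellA input x.1 x.2 = some '0') :
    bfsA input x = (((("0123456789".toList).drop 1).foldl
        (fun fr h => stepB input h fr) [x]).length : Int) := by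
  unfold bfsA
  have hstart : PySem.Set.add PySem.Set.empty x = [x] := rfl
  rw [hstart]
  have h0' : cellA input x.1 x.2 = some (digitChar 0) := h0
  rw [loopEq hg _ 0 [x] [x] 0 (by omega)
      (by intro y hy; rw [List.mem_singleton.mp hy]; exact ⟨hx, h0'⟩)
      (by intro y hy; rw [List.mem_singleton.mp hy]; exact ⟨0, le_refl _, h0'⟩)
      (by omega)]
  simp

theorem head_eq {input : List String} (hg : GoodGrid input) {x : Int × Int}
    (hgrid : inGrid input x) (h0 : cellA input x.1 x.2 = some '0') :
    bfsA input x =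
      ((((buildReach input (input.length : Int)
          ((input.headD "").toList.length : Int)).getD x PySem.Set.empty).length : Nat) : Int) := by
  obtain ⟨s, hget, hnods, hmem⟩ := buildReach_invR input x 0 (le_refl 0) (by omega) hgrid
    (show cellA input x.1 x.2 = some (digitChar 0) from h0)
  rw [PySem.Dict.getD_of_get?_eq_some _ _ hget]
  rw [bfs_eq_len hg hgrid h0]
  have hnodF : ((("0123456789".toList).drop 1).foldl
      (fun fr h => stepB input h fr) [x]).Nodup := by
    rw [show ("0123456789".toList).drop 1 = "12345678".toList ++ ['9'] from rfl,
      List.foldl_append, List.foldl_cons, List.foldl_nil]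
    exact nodup_stepB _ _ _
  have hperm : ((("0123456789".toList).drop 1).foldl
      (fun fr h => stepB input h fr) [x]).Perm s := by
    rw [List.perm_ext_iff_of_nodup hnodF hnods]
    intro z
    rw [hmem z]
    refine (frontier_mem input 9 (le_refl 9) [x] ?_ z).trans ?_
    · intro y hy
      rw [List.mem_singleton.mp hy]
      exact ⟨hgrid, h0⟩
    · simp
  exact_mod_cast hperm.length_eq

-- ===== sum shapes =====

-- the heads loop builds exactly the row-major list of '0'-cells
def headsList (input : List String) : List (Int × Int) :=
  (PySem.List.pyRange 0 (input.length : Int) 1).flatMap (fun r =>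
    ((PySem.List.pyRange 0 ((input.headD "").toList.length : Int) 1).map (fun c => (r, c))).filter
      (fun x => decide (cellA input x.1 x.2 = some '0')))

theorem foldl_add_if_fresh {α β : Type} [BEq β] [LawfulBEq β] (p : β → Prop) [DecidablePred p]
    (key : α → β) :
    ∀ (l : List α) (s : List β), (l.map key).Nodup → (∀ x ∈ l, key x ∉ s) →
      l.foldl (fun s x => if p (key x) then PySem.Set.add s (key x) else s) s
        = s ++ (l.map key).filter (fun x => decide (p x)) := by
  intro l
  induction l with
  | nil => intro s _ _; simp
  | cons x t ih =>
    intro s hnd hfresh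
    rw [List.map_cons] at hnd
    rw [List.foldl_cons]
    by_cases hp : p (key x)
    · rw [if_pos hp, PySem.Set.add_of_not_mem (hfresh x List.mem_cons_self)]
      rw [ih (s ++ [key x]) (List.nodup_cons.mp hnd).2 ?_]
      · simp [hp]
      · intro y hy hmem
        rcases List.mem_append.mp hmem with h | h
        · exact hfresh y (List.mem_cons_of_mem _ hy) h
        · exact (List.nodup_cons.mp hnd).1
            (List.mem_singleton.mp h ▸ List.mem_map_of_mem hy)
    · rw [if_neg hp, ih s (List.nodup_cons.mp hnd).2
        (fun y hy => hfresh y (List.mem_cons_of_mem _ hy))]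
      simp [hp]

theorem foldl_sum_if {α β : Type} (p : β → Prop) [DecidablePred p] (f : β → Int)
    (key : α → β) :
    ∀ (l : List α) (t : Int),
      l.foldl (fun t x => if p (key x) then t + f (key x) else t) t
        = t + (((l.map key).filter (fun x => decide (p x))).map f).sum := by
  intro l
  induction l with
  | nil => intro t; simp
  | cons x xs ih =>
    intro t
    rw [List.foldl_cons]
    by_cases hp : p (key x)
    · rw [if_pos hp, ih]
      simp [hp]; ring
    · rw [if_neg hp, ih]
      simp [hp]

theorem pyRange_len_nodup (n : Nat) : (PySem.List.pyRange 0 (n : Int) 1).Nodup := by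
  rw [PySem.List.pyRange_zero_natCast]
  exact (List.nodup_range).map (fun a b => by omega)

theorem mem_pyRange_len {n : Nat} {i : Int} (hi : i ∈ PySem.List.pyRange 0 (n : Int) 1) :
    0 ≤ i ∧ i < (n : Int) := by
  rw [PySem.List.pyRange_zero_natCast] at hi
  obtain ⟨m, hm, rfl⟩ := List.mem_map.mp hi
  have := List.mem_range.mp hm
  omega

theorem heads_outer (input : List String) :
    ∀ (rs : List Int) (s : List (Int × Int)), rs.Nodup → (∀ y ∈ s, y.1 ∉ rs) →
      rs.foldl (fun hs r =>
        (PySem.List.pyRange 0 ((input.headD "").toList.length : Int) 1).foldl (fun hs c =>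
          if cellA input r c = some '0' then PySem.Set.add hs (r, c) else hs) hs) s
      = s ++ rs.flatMap (fun r =>
          ((PySem.List.pyRange 0 ((input.headD "").toList.length : Int) 1).map
            (fun c => (r, c))).filter (fun x => decide (cellA input x.1 x.2 = some '0'))) := by
  intro rs
  induction rs with
  | nil => intro s _ _; simp
  | cons r rest ih =>
    intro s hnd hfresh
    rw [List.foldl_cons]
    have hinner :
        (PySem.List.pyRange 0 ((input.headD "").toList.length : Int) 1).foldl (fun hs c =>
          if cellA input r c = some '0' then PySem.Set.add hs (r, c) else hs) s
        = s ++ ((PySem.List.pyRange 0 ((input.headD "").toList.length : Int) 1).map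
            (fun c => (r, c))).filter (fun x => decide (cellA input x.1 x.2 = some '0')) :=
      foldl_add_if_fresh (fun x => cellA input x.1 x.2 = some '0') (fun c => (r, c)) _ s
        ((pyRange_len_nodup _).map (fun a b h => by simpa using h))
        (fun c _ hmem => hfresh _ hmem List.mem_cons_self)
    rw [hinner, ih _ (List.nodup_cons.mp hnd).2 ?_]
    · simp
    · intro y hy
      rcases List.mem_append.mp hy with h | h
      · intro hr
        exact hfresh y h (List.mem_cons_of_mem _ hr)
      · obtain ⟨c, _, rfl⟩ := List.mem_map.mp (List.mem_of_mem_filter h)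
        exact (List.nodup_cons.mp hnd).1

theorem A_sum (input : List String) :
    part1 input = ((headsList input).map (bfsA input)).sum := by
  unfold part1 headsList
  rw [heads_outer input _ PySem.Set.empty
    (pyRange_len_nodup input.length) (fun y hy => absurd hy List.not_mem_nil)]
  dsimp only [PySem.Set.empty]
  rw [List.nil_append, PySem.List.foldl_add]
  simp

theorem B_outer (input : List String) (f : Int × Int → Int) :
    ∀ (rs : List Int) (t : Int),
      rs.foldl (fun total r =>
        (PySem.List.pyRange 0 ((input.headD "").toList.length : Int) 1).foldl (fun total c =>
          if cellA input r c = some '0' then total + f (r, c) else total) total) t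
      = t + ((rs.flatMap (fun r =>
          ((PySem.List.pyRange 0 ((input.headD "").toList.length : Int) 1).map
            (fun c => (r, c))).filter (fun x => decide (cellA input x.1 x.2 = some '0')))).map
              f).sum := by
  intro rs
  induction rs with
  | nil => intro t; simp
  | cons r rest ih =>
    intro t
    rw [List.foldl_cons]
    have hinner :
        (PySem.List.pyRange 0 ((input.headD "").toList.length : Int) 1).foldl (fun total c =>
          if cellA input r c = some '0' then total + f (r, c) else total) t
        = t + ((((PySem.List.pyRange 0 ((input.headD "").toList.length : Int) 1).map
            (fun c => (r, c))).filter (fun x => decide (cellA input x.1 x.2 = some '0'))).map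
              f).sum :=
      foldl_sum_if (fun x => cellA input x.1 x.2 = some '0') f (fun c => (r, c)) _ t
    rw [hinner, ih]
    rw [List.flatMap_cons, List.map_append, List.sum_append]
    ring

theorem B_sum {input : List String} (hne : input ≠ []) :
    part1_alt input = ((headsList input).map (fun x =>
      ((((buildReach input (input.length : Int)
          ((input.headD "").toList.length : Int)).getD x PySem.Set.empty).length : Nat) : Int))).sum := by
  simp only [part1_alt, if_neg hne, cellB_eq]
  rw [B_outer input (fun x =>
    ((((buildReach input (input.length : Int)
        ((input.headD "").toList.length : Int)).getD x PySem.Set.empty).length : Nat) : Int))]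
  unfold headsList
  simp

theorem mem_headsList {input : List String} {x : Int × Int} (hx : x ∈ headsList input) :
    inGrid input x ∧ cellA input x.1 x.2 = some '0' := by
  unfold headsList at hx
  obtain ⟨r, hr, hx⟩ := List.mem_flatMap.mp hx
  have hp := List.of_mem_filter hx
  obtain ⟨c, hc, rfl⟩ := List.mem_map.mp (List.mem_of_mem_filter hx)
  obtain ⟨hr1, hr2⟩ := mem_pyRange_len hr
  obtain ⟨hc1, hc2⟩ := mem_pyRange_len hc
  exact ⟨⟨hr1, hr2, hc1, hc2⟩, of_decide_eq_true hp⟩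

-- ===== VERDICT (by name: the statement is the Claim_ definition above) =====
theorem part1_spec : Claim_equal_part1 := by
  intro input _ hpre
  unfold Spec_part1
  by_cases hne : input = []
  · subst hne; decide
  rcases hpre with rfl | ⟨hshapeB, hzeroB⟩
  · exact absurd rfl hne
  · have hshape : ∀ row ∈ input, (input.headD "").toList.length ≤ row.toList.length := by
      intro row hrow
      exact of_decide_eq_true (List.all_eq_true.mp hshapeB row hrow)
    rw [A_sum, B_sum hne]
    apply congrArg
    apply List.map_congr_left
    intro x hx
    obtain ⟨hgrid, hcell⟩ := mem_headsList hx
    have hdig : ∀ row ∈ input, ∀ ch ∈ row.toList.take (input.headD "").toList.length,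
        PySem.Chars.isdigit ch = true := by
      have hany : (input.any (fun row =>
          (row.toList.take (input.headD "").toList.length).contains '0')) = true := by
        obtain ⟨ch, row, hrow, hc, htake⟩ := cell_mem_take hshape hgrid
        rw [hcell] at hc
        rw [List.any_eq_true]
        exact ⟨row, hrow, List.contains_iff_mem.mpr ((Option.some.inj hc) ▸ htake)⟩
      have hall := List.all_eq_true.mp (hzeroB hany)
      intro row hrow ch hch
      exact List.all_eq_true.mp (hall row hrow) ch hch
    exact head_eq ⟨hshape, hdig⟩ hgrid hcell
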